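-- pv_equiv track=rewrite | github.com/atlantic-quantum/Svalbard | svalbard/utility/str_helper.py | convert_version_str
-- ===== SOURCE A (Python) =====
-- def convert_version_str(version_str: str = "1.0.0") -> int:
--     """Convert version string to a number for easy comparison, 1.2.3 => 123
--
--     Currently only supports single-digit version numbers.
--
--     Parameters
--     ----------
--     version_str : str, optional
--         Version string to convert, by default '1.0.0'
--
--     Returns
--     -------
--     int
--         Version as number.
--     """
--     if not isinstance(version_str, str):
--         version_str = str(version_str)
--     version_list = version_str.split(".")
--     # avoid errors if input is empty
--     if len(version_list) == 1 and len(version_list[0]) == 0: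
--         version_list = []
--     version_number = 0
--     for n, value in enumerate([100, 10, 1]):
--         # make sure code handles trailing zeros, ie 3.1 = 3.1.0
--         if n < len(version_list):
--             version_number += value * int(version_list[n][0])
--     return version_number
-- ===== SOURCE B (Python) =====
-- def convert_version_str(version_str: str = "1.0.0") -> int:
--     """Convert version string to a comparison int, via a 3-digit string."""
--     if not isinstance(version_str, str):
--         version_str = str(version_str)
--     digits = [comp[0] for comp in version_str.split(".")[:3]] if version_str else []
--     digits += ["0"] * (3 - len(digits))
--     return int("".join(digits))
-- ===== Notes on version B (the rewrite author's own statement) =====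
-- stated objective: alternative
-- what changed: A accumulates a weighted sum (100/10/1 times int of each component's first digit) in an enumerate loop; B instead collects the first character of at most the first three dotted components, right-pads with zero digits to length three, and parses the joined three-digit string with a single int() call.
import Mathlib
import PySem

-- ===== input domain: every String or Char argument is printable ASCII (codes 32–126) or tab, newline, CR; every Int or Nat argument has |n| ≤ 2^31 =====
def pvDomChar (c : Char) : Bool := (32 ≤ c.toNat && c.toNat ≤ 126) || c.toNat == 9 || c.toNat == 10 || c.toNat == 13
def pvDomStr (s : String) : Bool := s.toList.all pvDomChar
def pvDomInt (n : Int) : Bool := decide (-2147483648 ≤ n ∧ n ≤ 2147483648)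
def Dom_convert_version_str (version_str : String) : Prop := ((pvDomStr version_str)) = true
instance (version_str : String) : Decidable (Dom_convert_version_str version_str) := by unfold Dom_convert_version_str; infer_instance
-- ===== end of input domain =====

-- B builds the result as a 3-digit string (first digit of each of the first three components,
-- right-padded with '0') parsed once by int(), instead of A's enumerate loop with a weighted sum.

-- ===== PORT A =====
def convert_version_str (version_str : String) : Int :=
  let version_list := (PySem.Str.split? version_str ".").getD []
  let version_list :=
    if version_list.length = 1 ∧ PySem.Str.len (PySem.List.pyGetD version_list 0 "") = 0
    then ([] : List String) else version_list
  (PySem.List.enumerate [(100 : Int), 10, 1]).foldl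
    (fun version_number nv =>
      if nv.1 < PySem.List.len version_list then
        version_number + nv.2 *
          (PySem.Int.ofChars?
            [(PySem.Str.pyGet? (PySem.List.pyGetD version_list nv.1 "") 0).getD '0']).getD 0
      else version_number) 0

-- ===== PORT B =====
def convert_version_str_alt (version_str : String) : Int :=
  let digits : List Char :=
    if version_str ≠ "" then
      (((PySem.Str.split? version_str ".").getD []).take 3).map
        (fun comp => (PySem.Str.pyGet? comp 0).getD '0')
    else []
  let digits := digits ++ List.replicate (3 - digits.length) '0'
  (PySem.Int.ofChars? digits).getD 0

-- ===== PRECONDITION & SPEC =====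
-- Pre_ excludes exactly the inputs where the Python A raises: a nonempty version string among
-- whose first three dot-separated components one is empty (IndexError on comp[0]) or one starts
-- with a non-digit character (ValueError in int()).
def Pre_convert_version_str (version_str : String) : Prop :=
  version_str = "" ∨
    ∀ comp ∈ (((PySem.Str.split? version_str ".").getD []).take 3),
      comp ≠ "" ∧ PySem.Chars.isdigit (comp.toList.headD ' ') = true
instance (version_str : String) : Decidable (Pre_convert_version_str version_str) := by
  unfold Pre_convert_version_str; infer_instance
def pvWitness_convert_version_str : String := "1.2.3"
def Spec_convert_version_str (version_str : String) (out : Int) : Prop := out = convert_version_str_alt version_str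
instance (version_str : String) (out : Int) : Decidable (Spec_convert_version_str version_str out) := by unfold Spec_convert_version_str; infer_instance

-- ===== CLAIM (what is proved, stated in full; the proofs are below) =====
def Claim_equal_convert_version_str : Prop := ∀ (version_str : String), Dom_convert_version_str version_str → Pre_convert_version_str version_str → Spec_convert_version_str version_str (convert_version_str version_str)

-- ===== LEMMAS AND PROOFS =====

/-- The accumulator/fuel loop behind `PySem.Chars.splitOn` always produces
`acc.reverse` followed by a first piece that extends `cur.reverse`. -/
lemma pv_go_spec (sep : List Char) (fuel : Nat) (l cur : List Char) (acc : List (List Char)) :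
    ∃ p ps, PySem.Chars.splitOn.go sep fuel l cur acc = acc.reverse ++ (cur.reverse ++ p) :: ps := by
  induction fuel generalizing l cur acc with
  | zero => exact ⟨l, [], by simp [PySem.Chars.splitOn.go]⟩
  | succ fuel ih =>
    cases l with
    | nil => exact ⟨[], [], by simp [PySem.Chars.splitOn.go]⟩
    | cons c rest =>
      rw [PySem.Chars.splitOn.go]
      split_ifs with h
      · obtain ⟨p, ps, hp⟩ := ih (List.drop sep.length (c :: rest)) [] (cur.reverse :: acc)
        exact ⟨[], p :: ps, by simp at hp; simp [hp]⟩
      · obtain ⟨p, ps, hp⟩ := ih rest (c :: cur) acc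
        exact ⟨c :: p, ps, by simp at hp; simp [hp]⟩

lemma pv_splitOn_ne_nil (s sep : List Char) : PySem.Chars.splitOn s sep ≠ [] := by
  unfold PySem.Chars.splitOn
  obtain ⟨p, ps, hp⟩ := pv_go_spec sep (s.length + 1) s [] []
  simp [hp]

/-- Splitting a nonempty string never yields exactly one empty piece. -/
lemma pv_splitOn_cons_ne (c : Char) (rest sep : List Char) :
    PySem.Chars.splitOn (c :: rest) sep ≠ [[]] := by
  unfold PySem.Chars.splitOn
  rw [show (c :: rest).length + 1 = rest.length + 1 + 1 by simp]
  rw [PySem.Chars.splitOn.go]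
  split_ifs with h
  · obtain ⟨p, ps, hp⟩ := pv_go_spec sep (rest.length + 1) (List.drop sep.length (c :: rest)) [] [[].reverse]
    simp at hp
    simp [hp]
  · obtain ⟨p, ps, hp⟩ := pv_go_spec sep (rest.length + 1) rest [c] []
    simp at hp
    simp [hp]

def pvDigits : List Char := ['0','1','2','3','4','5','6','7','8','9']

lemma pv_digit_mem (c : Char) (h : PySem.Chars.isdigit c = true) : c ∈ pvDigits := by
  simp only [PySem.Chars.isdigit, Bool.and_eq_true, decide_eq_true_eq, Char.le_def] at h
  obtain ⟨hl, hr⟩ : 48 ≤ c.toNat ∧ c.toNat ≤ 57 := ⟨h.1, h.2⟩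
  rw [← Char.ofNat_toNat c]
  set n := c.toNat with hn
  clear_value n
  interval_cases n <;> decide

lemma pv_getD1 {α : Type} (x y : α) (xs : List α) (d : α) :
    PySem.List.pyGetD (x :: y :: xs) (0 + 1) d = y := by
  rw [show ((0:Int) + 1) = ((1 : Nat) : Int) by norm_num, PySem.List.pyGetD_natCast]
  simp [List.getD]

lemma pv_getD2 {α : Type} (x y z : α) (xs : List α) (d : α) :
    PySem.List.pyGetD (x :: y :: z :: xs) (0 + 1 + 1) d = z := by
  rw [show ((0:Int) + 1 + 1) = ((2 : Nat) : Int) by norm_num, PySem.List.pyGetD_natCast]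
  simp [List.getD]

/-- int() of a 3-digit string is the weighted sum of int() of its digits. -/
lemma pv_three_digit (a b c : Char) (ha : a ∈ pvDigits) (hb : b ∈ pvDigits) (hc : c ∈ pvDigits) :
    (PySem.Int.ofChars? [a, b, c]).getD 0 =
      100 * (PySem.Int.ofChars? [a]).getD 0 + 10 * (PySem.Int.ofChars? [b]).getD 0 +
        (PySem.Int.ofChars? [c]).getD 0 := by
  fin_cases ha <;> fin_cases hb <;> fin_cases hc <;> decide

-- ===== VERDICT (by name: the statement is the Claim_ definition above) =====
theorem convert_version_str_spec : Claim_equal_convert_version_str := by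
  intro v _ hpre
  unfold Spec_convert_version_str
  rcases hpre with rfl | hall
  · decide
  · have hv : v ≠ "" := by
      rintro rfl
      exact (hall "" (by decide)).1 rfl
    obtain ⟨c, rest, hcs⟩ : ∃ c rest, v.toList = c :: rest := by
      cases h : v.toList with
      | nil => exact absurd (String.toList_inj.mp (by simp [h])) hv
      | cons a b => exact ⟨a, b, rfl⟩
    have hne : PySem.Chars.splitOn v.toList ['.'] ≠ [[]] := by
      rw [hcs]; exact pv_splitOn_cons_ne c rest ['.']
    rcases hsp : PySem.Chars.splitOn v.toList ['.'] with _ | ⟨p1, _ | ⟨p2, _ | ⟨p3, ptl⟩⟩⟩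
    · exact absurd hsp (pv_splitOn_ne_nil _ _)
    -- one component
    · have hL : (PySem.Str.split? v ".").getD [] = [String.ofList p1] := by
        simp [PySem.Str.split?, PySem.Chars.split?, show (".").toList = ['.'] from rfl, hsp]
      have hm := hall (String.ofList p1) (by rw [hL]; simp)
      obtain ⟨c0, t1, h1⟩ : ∃ c0 t1, p1 = c0 :: t1 := by
        cases p1 with
        | nil => exact absurd (by simp) hm.1
        | cons a b => exact ⟨a, b, rfl⟩
      have hd0 : c0 ∈ pvDigits := pv_digit_mem _ (by simpa [h1] using hm.2)
      have hz : ('0' : Char) ∈ pvDigits := by decide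
      simp only [convert_version_str, convert_version_str_alt, hL, h1]
      rw [if_neg (by simp [PySem.List.pyGetD_zero_cons, PySem.Str.len_eq]; omega)]
      simp only [PySem.List.enumerate, List.foldl, PySem.List.len_eq, List.length_cons, if_pos hv,
        PySem.List.pyGetD_zero_cons]
      norm_num
      simp [pv_three_digit c0 '0' '0' hd0 hz hz, List.replicate,
        show (PySem.Int.ofChars? ['0']).getD 0 = 0 from by decide]
    -- two components
    · have hL : (PySem.Str.split? v ".").getD [] = [String.ofList p1, String.ofList p2] := by
        simp [PySem.Str.split?, PySem.Chars.split?, show (".").toList = ['.'] from rfl, hsp]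
      have hm1 := hall (String.ofList p1) (by rw [hL]; simp)
      have hm2 := hall (String.ofList p2) (by rw [hL]; simp)
      obtain ⟨c0, t1, h1⟩ : ∃ c0 t1, p1 = c0 :: t1 := by
        cases p1 with
        | nil => exact absurd (by simp) hm1.1
        | cons a b => exact ⟨a, b, rfl⟩
      obtain ⟨c1, t2, h2⟩ : ∃ c1 t2, p2 = c1 :: t2 := by
        cases p2 with
        | nil => exact absurd (by simp) hm2.1
        | cons a b => exact ⟨a, b, rfl⟩
      have hd0 : c0 ∈ pvDigits := pv_digit_mem _ (by simpa [h1] using hm1.2)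
      have hd1 : c1 ∈ pvDigits := pv_digit_mem _ (by simpa [h2] using hm2.2)
      have hz : ('0' : Char) ∈ pvDigits := by decide
      simp only [convert_version_str, convert_version_str_alt, hL, h1, h2]
      rw [if_neg (by simp)]
      simp only [PySem.List.enumerate, List.foldl, PySem.List.len_eq, List.length_cons, if_pos hv,
        PySem.List.pyGetD_zero_cons, pv_getD1]
      norm_num
      simp [pv_three_digit c0 c1 '0' hd0 hd1 hz]
      decide
    -- three or more components
    · have hL : (PySem.Str.split? v ".").getD [] =
          String.ofList p1 :: String.ofList p2 :: String.ofList p3 :: ptl.map String.ofList := by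
        simp [PySem.Str.split?, PySem.Chars.split?, show (".").toList = ['.'] from rfl, hsp]
      have hm1 := hall (String.ofList p1) (by rw [hL]; simp)
      have hm2 := hall (String.ofList p2) (by rw [hL]; simp)
      have hm3 := hall (String.ofList p3) (by rw [hL]; simp)
      obtain ⟨c0, t1, h1⟩ : ∃ c0 t1, p1 = c0 :: t1 := by
        cases p1 with
        | nil => exact absurd (by simp) hm1.1
        | cons a b => exact ⟨a, b, rfl⟩
      obtain ⟨c1, t2, h2⟩ : ∃ c1 t2, p2 = c1 :: t2 := by
        cases p2 with
        | nil => exact absurd (by simp) hm2.1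
        | cons a b => exact ⟨a, b, rfl⟩
      obtain ⟨c2, t3, h3⟩ : ∃ c2 t3, p3 = c2 :: t3 := by
        cases p3 with
        | nil => exact absurd (by simp) hm3.1
        | cons a b => exact ⟨a, b, rfl⟩
      have hd0 : c0 ∈ pvDigits := pv_digit_mem _ (by simpa [h1] using hm1.2)
      have hd1 : c1 ∈ pvDigits := pv_digit_mem _ (by simpa [h2] using hm2.2)
      have hd2 : c2 ∈ pvDigits := pv_digit_mem _ (by simpa [h3] using hm3.2)
      simp only [convert_version_str, convert_version_str_alt, hL, h1, h2, h3]
      rw [if_neg (by simp)]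
      simp only [PySem.List.enumerate, List.foldl, PySem.List.len_eq, List.length_cons, if_pos hv,
        pv_getD1, pv_getD2, PySem.List.pyGetD_zero_cons]
      norm_num
      simp [pv_three_digit c0 c1 c2 hd0 hd1 hd2]
      split_ifs <;> first | ring1 | (exfalso; omega)
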